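-- pv_equiv track=rewrite | github.com/RaulRDA/convierte-tu | PROTOTIPO/pdf_a_excel_EOI.py | buscar_valor_en_campos
-- ===== SOURCE A (Python) =====
-- def buscar_valor_en_campos(campos: dict, clave_mapeo: str) -> str | None:
--     """
--     Busca un valor en el diccionario de campos.
--     Primero exacto; luego la clave del PDF empieza por la clave del mapeo;
--     finalmente la clave del mapeo empieza por la del PDF (solo si len > 8).
--     Se evita devolver valores de claves demasiado cortas y ambiguas.
--     """
--     if clave_mapeo in campos:
--         return campos[clave_mapeo]
--     for clave_pdf, valor in campos.items():
--         if clave_pdf.startswith(clave_mapeo) and len(clave_mapeo) > 5: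
--             return valor
--     for clave_pdf, valor in campos.items():
--         if clave_mapeo.startswith(clave_pdf) and len(clave_pdf) > 8:
--             return valor
--     return None
-- ===== SOURCE B (Python) =====
-- def buscar_valor_en_campos(campos: dict, clave_mapeo: str) -> str | None:
--     """Single pass: exact lookup first, then one scan keeping two
--     first-found candidate slots (forward outranks reverse)."""
--     if clave_mapeo in campos:
--         return campos[clave_mapeo]
--     cand_forward = None
--     cand_reverse = None
--     for clave_pdf, valor in campos.items():
--         if cand_forward is None and clave_pdf.startswith(clave_mapeo) and len(clave_mapeo) > 5:
--             cand_forward = valor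
--         if cand_reverse is None and clave_mapeo.startswith(clave_pdf) and len(clave_pdf) > 8:
--             cand_reverse = valor
--     return cand_forward if cand_forward is not None else cand_reverse
-- ===== Notes on version B (the rewrite author's own statement) =====
-- stated objective: alternative
-- what changed: Fuses A's two sequential scans over campos.items() into a single pass that maintains two first-found candidate slots (forward match outranking reverse match), returned after the loop.
import Mathlib
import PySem

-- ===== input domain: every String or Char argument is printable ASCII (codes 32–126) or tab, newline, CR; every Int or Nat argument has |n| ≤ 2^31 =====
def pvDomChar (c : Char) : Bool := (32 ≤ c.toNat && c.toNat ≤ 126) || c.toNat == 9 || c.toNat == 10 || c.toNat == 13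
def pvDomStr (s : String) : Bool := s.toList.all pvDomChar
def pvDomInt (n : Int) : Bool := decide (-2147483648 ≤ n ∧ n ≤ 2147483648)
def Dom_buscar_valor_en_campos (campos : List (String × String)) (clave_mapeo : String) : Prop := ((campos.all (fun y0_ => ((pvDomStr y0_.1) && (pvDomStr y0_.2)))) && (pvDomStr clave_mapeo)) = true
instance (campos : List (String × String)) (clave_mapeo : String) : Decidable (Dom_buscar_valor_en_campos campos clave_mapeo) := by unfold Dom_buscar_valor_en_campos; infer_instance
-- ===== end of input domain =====

-- B fuses A's two sequential scans into one pass with two first-found candidate slots; same cost, different decomposition.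
-- ===== PORT A =====
-- first loop: return valor for the first clave_pdf that starts with clave_mapeo (len(clave_mapeo) > 5)
def pvScanFwd (clave_mapeo : String) : List (String × String) → Option String
  | [] => none
  | (clave_pdf, valor) :: rest =>
      if PySem.Str.startswith clave_pdf clave_mapeo && decide ((5 : Int) < PySem.Str.len clave_mapeo)
      then some valor else pvScanFwd clave_mapeo rest

-- second loop: return valor for the first clave_pdf that clave_mapeo starts with (len(clave_pdf) > 8)
def pvScanRev (clave_mapeo : String) : List (String × String) → Option String
  | [] => none
  | (clave_pdf, valor) :: rest =>
      if PySem.Str.startswith clave_mapeo clave_pdf && decide ((8 : Int) < PySem.Str.len clave_pdf)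
      then some valor else pvScanRev clave_mapeo rest

def buscar_valor_en_campos (campos : List (String × String)) (clave_mapeo : String) : Option String :=
  let d := PySem.Dict.ofList campos     -- campos is a Python dict: duplicate keys collapse as dict() does
  if d.contains clave_mapeo then d.get? clave_mapeo
  else match pvScanFwd clave_mapeo d.items with
       | some valor => some valor
       | none => pvScanRev clave_mapeo d.items

-- ===== PORT B =====
-- B's single loop: thread the two candidate slots (cand_forward, cand_reverse), each set at most once
def pvPass (clave_mapeo : String) : List (String × String) → Option String → Option String → Option String × Option String
  | [], cf, cr => (cf, cr)
  | (clave_pdf, valor) :: rest, cf, cr =>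
      pvPass clave_mapeo rest
        (if cf.isNone && (PySem.Str.startswith clave_pdf clave_mapeo && decide ((5 : Int) < PySem.Str.len clave_mapeo)) then some valor else cf)
        (if cr.isNone && (PySem.Str.startswith clave_mapeo clave_pdf && decide ((8 : Int) < PySem.Str.len clave_pdf)) then some valor else cr)

def buscar_valor_en_campos_alt (campos : List (String × String)) (clave_mapeo : String) : Option String :=
  let d := PySem.Dict.ofList campos     -- same dict semantics as A's campos
  match d.get? clave_mapeo with
  | some v => some v
  | none =>
      let st := pvPass clave_mapeo d.items none none
      st.1.or st.2

-- ===== PRECONDITION & SPEC =====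
def Spec_buscar_valor_en_campos (campos : List (String × String)) (clave_mapeo : String) (out : Option String) : Prop := out = buscar_valor_en_campos_alt campos clave_mapeo
instance (campos : List (String × String)) (clave_mapeo : String) (out : Option String) : Decidable (Spec_buscar_valor_en_campos campos clave_mapeo out) := by unfold Spec_buscar_valor_en_campos; infer_instance

-- ===== CLAIM (what is proved, stated in full; the proofs are below) =====
def Claim_equal_buscar_valor_en_campos : Prop := ∀ (campos : List (String × String)) (clave_mapeo : String), Dom_buscar_valor_en_campos campos clave_mapeo → Spec_buscar_valor_en_campos campos clave_mapeo (buscar_valor_en_campos campos clave_mapeo)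

-- ===== LEMMAS AND PROOFS =====

lemma pvPass_fst (k : String) (l : List (String × String)) (cf cr : Option String) :
    (pvPass k l cf cr).1 = cf.or (pvScanFwd k l) := by
  induction l generalizing cf cr with
  | nil => simp [pvPass, pvScanFwd]
  | cons p t ih =>
      obtain ⟨kp, v⟩ := p
      rw [pvPass, ih]
      cases cf with
      | some x => simp
      | none => simp only [pvScanFwd, Option.isNone_none, Bool.true_and, Option.none_or]; split_ifs <;> simp

lemma pvPass_snd (k : String) (l : List (String × String)) (cf cr : Option String) :
    (pvPass k l cf cr).2 = cr.or (pvScanRev k l) := by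
  induction l generalizing cf cr with
  | nil => simp [pvPass, pvScanRev]
  | cons p t ih =>
      obtain ⟨kp, v⟩ := p
      rw [pvPass, ih]
      cases cr with
      | some x => simp
      | none => simp only [pvScanRev, Option.isNone_none, Bool.true_and, Option.none_or]; split_ifs <;> simp

-- ===== VERDICT (by name: the statement is the Claim_ definition above) =====
theorem buscar_valor_en_campos_spec : Claim_equal_buscar_valor_en_campos := by
  intro campos clave_mapeo _
  unfold Spec_buscar_valor_en_campos buscar_valor_en_campos buscar_valor_en_campos_alt
  dsimp only
  rw [PySem.Dict.contains_eq_isSome_get?]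
  cases h : (PySem.Dict.ofList campos).get? clave_mapeo with
  | some v => simp
  | none =>
      simp only [Option.isSome_none, Bool.false_eq_true, if_false]
      rw [pvPass_fst, pvPass_snd]
      cases hf : pvScanFwd clave_mapeo (PySem.Dict.ofList campos).items <;> simp [Option.or]
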